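-- pv_equiv track=rewrite | github.com/Gipsy-The-Sheller/YR-MPE | YR_MPE/plugins/components/methods/streamlined_ete.py | build_tree_block
-- ===== SOURCE A (Python) =====
-- def build_tree_block(newick_string):
--     tree_blocks = ['']
--     for i in newick_string: # split newick string into blocks to parse taxon names
--         if i == ' ':
--             continue
--         # ( / ) indicates the increase / decrease of stack depth
--         elif i == ')':
--             tree_blocks.append(i)
--         elif i == '(':
--             tree_blocks[-1] += i
--             tree_blocks.append('')
--         elif i == ',':
--             # tree_blocks.append(i)
--             tree_blocks.append('')
--             # for the next possible OTU or (
--         elif i == ';':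
--             break
--         else:
--             tree_blocks[-1] += i
--     return tree_blocks
-- ===== SOURCE B (Python) =====
-- def build_tree_block(newick_string):
--     # Truncate at the first ';', delete spaces, then mark every block boundary
--     # with NUL (never present in the printable-ASCII domain) and split once.
--     s = newick_string.split(';')[0].replace(' ', '')
--     s = s.replace('(', '(\x00').replace(')', '\x00)').replace(',', '\x00')
--     return s.split('\x00')
-- ===== Notes on version B (the rewrite author's own statement) =====
-- stated objective: simpler
-- what changed: Replaces A's per-character branch loop with mutable last-block state by loop-free string surgery: truncate at the first ';', delete spaces, mark every block boundary with a NUL sentinel via three str.replace calls, and split once; this also avoids A's repeated string concatenation onto the last block.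
import Mathlib
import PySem

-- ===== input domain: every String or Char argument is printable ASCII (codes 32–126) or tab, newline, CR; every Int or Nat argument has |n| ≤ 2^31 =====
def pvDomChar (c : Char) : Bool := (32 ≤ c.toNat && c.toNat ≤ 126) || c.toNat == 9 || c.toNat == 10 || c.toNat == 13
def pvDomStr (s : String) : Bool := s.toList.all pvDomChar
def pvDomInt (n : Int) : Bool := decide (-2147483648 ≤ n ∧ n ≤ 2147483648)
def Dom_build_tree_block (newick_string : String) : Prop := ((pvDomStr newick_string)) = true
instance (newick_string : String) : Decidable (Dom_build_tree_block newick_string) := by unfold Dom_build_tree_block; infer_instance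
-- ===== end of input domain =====

-- B replaces A's per-character branch loop by loop-free string surgery: truncate at ';',
-- delete spaces, mark every block boundary with a NUL sentinel and split once (objective: simpler).

-- ===== PORT A =====
-- tree_blocks[-1] += s  (the last block always exists in A; [] case is unreachable)
def btbAppendLast : List String → String → List String
  | [], s => [s]
  | [b], s => [b ++ s]
  | b :: bs, s => b :: btbAppendLast bs s

-- the 'for i in newick_string' loop of A, branch for branch ('continue' / 'break' included)
def btbLoop : List Char → List String → List String
  | [], tree_blocks => tree_blocks
  | i :: rest, tree_blocks =>
    if i = ' ' then btbLoop rest tree_blocks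
    else if i = ')' then btbLoop rest (tree_blocks ++ [String.singleton i])
    else if i = '(' then btbLoop rest (btbAppendLast tree_blocks (String.singleton i) ++ [""])
    else if i = ',' then btbLoop rest (tree_blocks ++ [""])
    else if i = ';' then tree_blocks
    else btbLoop rest (btbAppendLast tree_blocks (String.singleton i))

def build_tree_block (newick_string : String) : List String :=
  btbLoop newick_string.toList [""]

-- ===== PORT B =====
def build_tree_block_alt (newick_string : String) : List String :=
  let s1 := PySem.Str.replace
      (PySem.List.pyGetD ((PySem.Str.split? newick_string ";").getD []) 0 "") " " ""
  let s2 := PySem.Str.replace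
      (PySem.Str.replace (PySem.Str.replace s1 "(" "(\x00") ")" "\x00)") "," "\x00"
  (PySem.Str.split? s2 "\x00").getD []

-- ===== PRECONDITION & SPEC =====
def Spec_build_tree_block (newick_string : String) (out : List String) : Prop := out = build_tree_block_alt newick_string
instance (newick_string : String) (out : List String) : Decidable (Spec_build_tree_block newick_string out) := by unfold Spec_build_tree_block; infer_instance

-- ===== CLAIM (what is proved, stated in full; the proofs are below) =====
def Claim_equal_build_tree_block : Prop := ∀ (newick_string : String), Dom_build_tree_block newick_string → Spec_build_tree_block newick_string (build_tree_block newick_string)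

-- ===== LEMMAS AND PROOFS =====

-- spec-side: split a char list at a single delimiter character (Python str.split)
def splitCh (d : Char) : List Char → List (List Char)
  | [] => [[]]
  | c :: t =>
    match splitCh d t with
    | h :: r => if c = d then [] :: h :: r else (c :: h) :: r
    | [] => []

-- spec-side: append to the last block, char-list level
def appendLastC : List (List Char) → List Char → List (List Char)
  | [], s => [s]
  | [b], s => [b ++ s]
  | b :: bs, s => b :: appendLastC bs s

-- spec-side: the common core loop (spaces and ';' already removed)
def coreC : List Char → List (List Char) → List (List Char)
  | [], bs => bs
  | c :: rest, bs =>
    if c = ')' then coreC rest (bs ++ [[')']])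
    else if c = '(' then coreC rest (appendLastC bs ['('] ++ [[]])
    else if c = ',' then coreC rest (bs ++ [[]])
    else coreC rest (appendLastC bs [c])

-- spec-side: the combined effect of B's three boundary-marking replaces on one char
def markF (c : Char) : List Char :=
  if c = '(' then ['(', '\x00']
  else if c = ')' then ['\x00', ')']
  else if c = ',' then ['\x00']
  else [c]

theorem splitCh_ne_nil (d : Char) (l : List Char) : splitCh d l ≠ [] := by
  induction l with
  | nil => simp [splitCh]
  | cons c t ih =>
    cases h : splitCh d t with
    | nil => exact absurd h ih
    | cons a r =>
      simp only [splitCh, h]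
      split <;> simp

theorem appendLastC_nil_right (bs : List (List Char)) (h : bs ≠ []) :
    appendLastC bs [] = bs := by
  induction bs with
  | nil => exact absurd rfl h
  | cons b bs ih =>
    cases bs with
    | nil => simp [appendLastC]
    | cons b' bs' => simp [appendLastC, ih]

theorem appendLastC_append_singleton (bs : List (List Char)) (y s : List Char) :
    appendLastC (bs ++ [y]) s = bs ++ [y ++ s] := by
  induction bs with
  | nil => simp [appendLastC]
  | cons b bs ih =>
    cases bs with
    | nil => simp [appendLastC]
    | cons b' bs' => simpa [appendLastC] using ih

theorem appendLastC_ne_nil (bs : List (List Char)) (s : List Char) :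
    appendLastC bs s ≠ [] := by
  cases bs with
  | nil => simp [appendLastC]
  | cons b bs => cases bs <;> simp [appendLastC]

theorem appendLastC_cons (b : List Char) (z : List (List Char)) (s : List Char) (h : z ≠ []) :
    appendLastC (b :: z) s = b :: appendLastC z s := by
  cases z with
  | nil => exact absurd rfl h
  | cons b' bs' => rfl

theorem appendLastC_assoc (bs : List (List Char)) (x y : List Char) :
    appendLastC (appendLastC bs x) y = appendLastC bs (x ++ y) := by
  induction bs with
  | nil => simp [appendLastC]
  | cons b bs ih =>
    cases bs with
    | nil => simp [appendLastC]
    | cons b' bs' =>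
      rw [appendLastC_cons b (b' :: bs') x (by simp),
          appendLastC_cons b (appendLastC (b' :: bs') x) y (appendLastC_ne_nil _ _),
          appendLastC_cons b (b' :: bs') (x ++ y) (by simp), ih]

theorem singleton_ofList (c : Char) : String.singleton c = String.ofList [c] := rfl

theorem btbAppendLast_map (bs : List (List Char)) (s : List Char) :
    btbAppendLast (bs.map String.ofList) (String.ofList s) = (appendLastC bs s).map String.ofList := by
  induction bs with
  | nil => simp [btbAppendLast, appendLastC]
  | cons b bs ih =>
    cases bs with
    | nil =>
      show [String.ofList b ++ String.ofList s] = [String.ofList (b ++ s)]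
      simp
    | cons b' bs' =>
      simp only [List.map_cons, btbAppendLast, appendLastC]
      exact congrArg _ (by simpa using ih)

-- A's loop is the core loop on the cleaned character list
theorem btbLoop_eq_coreC (cs : List Char) : ∀ (bs : List (List Char)),
    btbLoop cs (bs.map String.ofList) =
      (coreC ((cs.takeWhile (· ≠ ';')).filter (· ≠ ' ')) bs).map String.ofList := by
  induction cs with
  | nil => intro bs; simp [btbLoop, coreC]
  | cons c rest ih =>
    intro bs
    by_cases hsc : c = ';'
    · subst hsc; simp [btbLoop, coreC]
    · by_cases hsp : c = ' '
      · subst hsp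
        simpa [btbLoop] using ih bs
      · by_cases hcl : c = ')'
        · subst hcl
          simpa [btbLoop, coreC, singleton_ofList] using ih (bs ++ [[')']])
        · by_cases hop : c = '('
          · subst hop
            have h2 := ih (appendLastC bs ['('] ++ [[]])
            rw [List.map_append] at h2
            simp only [List.map_cons, List.map_nil] at h2
            rw [show String.ofList ([] : List Char) = "" from rfl] at h2
            rw [← btbAppendLast_map, ← singleton_ofList] at h2
            simpa [btbLoop, coreC] using h2
          · by_cases hcm : c = ','
            · subst hcm
              have h2 := ih (bs ++ [[]])
              rw [List.map_append] at h2
              simp only [List.map_cons, List.map_nil] at h2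
              rw [show String.ofList ([] : List Char) = "" from rfl] at h2
              simpa [btbLoop, coreC] using h2
            · have h1 : btbAppendLast (bs.map String.ofList) (String.singleton c) =
                  (appendLastC bs [c]).map String.ofList := by
                rw [singleton_ofList, btbAppendLast_map]
              simpa [btbLoop, coreC, hsc, hsp, hcl, hop, hcm, h1] using ih (appendLastC bs [c])

-- PySem.Chars.replace with a single-char pattern is a flatMap
theorem replace_go_single (d : Char) (new : List Char) :
    ∀ (fuel : Nat) (l acc : List Char), l.length ≤ fuel →
      PySem.Chars.replace.go [d] new fuel l acc =
        acc.reverse ++ l.flatMap (fun c => if c = d then new else [c]) := by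
  intro fuel
  induction fuel with
  | zero =>
    intro l acc h
    have : l = [] := List.length_eq_zero_iff.mp (Nat.le_zero.mp h)
    subst this; simp [PySem.Chars.replace.go]
  | succ n ih =>
    intro l acc h
    cases l with
    | nil => simp [PySem.Chars.replace.go]
    | cons c t =>
      have ht : t.length ≤ n := by simpa using h
      have hpre : ([d] : List Char).isPrefixOf (c :: t) = (d == c) := by
        simp [List.isPrefixOf]
      by_cases hc : c = d
      · have hstep : PySem.Chars.replace.go [d] new (n+1) (c :: t) acc =
            PySem.Chars.replace.go [d] new n t (new.reverse ++ acc) := by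
          simp [PySem.Chars.replace.go, hc]
        rw [hstep, ih t _ ht]
        simp [hc]
      · have hbeq : (d == c) = false := beq_eq_false_iff_ne.mpr (Ne.symm hc)
        have hstep : PySem.Chars.replace.go [d] new (n+1) (c :: t) acc =
            PySem.Chars.replace.go [d] new n t (c :: acc) := by
          simp [PySem.Chars.replace.go, hpre, hbeq]
        rw [hstep, ih t _ ht]
        simp [hc]

theorem replace_single (d : Char) (new l : List Char) :
    PySem.Chars.replace l [d] new = l.flatMap (fun c => if c = d then new else [c]) := by
  simpa [PySem.Chars.replace] using replace_go_single d new l.length l [] le_rfl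

-- PySem.Chars.splitOn with a single-char separator is splitCh
theorem splitOn_go_single (d : Char) :
    ∀ (fuel : Nat) (l cur : List Char) (acc : List (List Char)), l.length < fuel →
      PySem.Chars.splitOn.go [d] fuel l cur acc =
        acc.reverse ++
          (match splitCh d l with
            | h :: r => (cur.reverse ++ h) :: r
            | [] => []) := by
  intro fuel
  induction fuel with
  | zero => intro l cur acc h; omega
  | succ n ih =>
    intro l cur acc h
    cases l with
    | nil => simp [PySem.Chars.splitOn.go, splitCh]
    | cons c t =>
      have ht : t.length < n := by simpa using h
      have hpre : ([d] : List Char).isPrefixOf (c :: t) = (d == c) := by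
        simp [List.isPrefixOf]
      obtain ⟨h', r', hr⟩ : ∃ h' r', splitCh d t = h' :: r' := by
        cases hx : splitCh d t with
        | nil => exact absurd hx (splitCh_ne_nil d t)
        | cons a b => exact ⟨a, b, rfl⟩
      by_cases hc : c = d
      · have hstep : PySem.Chars.splitOn.go [d] (n+1) (c :: t) cur acc =
            PySem.Chars.splitOn.go [d] n t [] (cur.reverse :: acc) := by
          simp [PySem.Chars.splitOn.go, hc]
        rw [hstep, ih t [] _ ht]
        simp [splitCh, hr, hc]
      · have hbeq : (d == c) = false := beq_eq_false_iff_ne.mpr (Ne.symm hc)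
        have hstep : PySem.Chars.splitOn.go [d] (n+1) (c :: t) cur acc =
            PySem.Chars.splitOn.go [d] n t (c :: cur) acc := by
          simp [PySem.Chars.splitOn.go, hpre, hbeq]
        rw [hstep, ih t (c :: cur) _ ht]
        simp [splitCh, hr, hc]

theorem splitOn_single (d : Char) (l : List Char) :
    PySem.Chars.splitOn l [d] = splitCh d l := by
  have := splitOn_go_single d (l.length + 1) l [] [] (Nat.lt_succ_self _)
  obtain ⟨h', r', hr⟩ : ∃ h' r', splitCh d l = h' :: r' := by
    cases hx : splitCh d l with
    | nil => exact absurd hx (splitCh_ne_nil d l)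
    | cons a b => exact ⟨a, b, rfl⟩
  simpa [PySem.Chars.splitOn, hr] using this

theorem splitCh_head (d : Char) (l : List Char) :
    ∃ r, splitCh d l = l.takeWhile (· ≠ d) :: r := by
  induction l with
  | nil => exact ⟨[], rfl⟩
  | cons c t ih =>
    obtain ⟨r, hr⟩ := ih
    by_cases hc : c = d
    · exact ⟨splitCh d t, by simp [splitCh, hr, List.takeWhile, hc]⟩
    · exact ⟨r, by simp [splitCh, hr, List.takeWhile, hc]⟩

-- the main induction: the core loop equals split-at-NUL of the marked string
theorem coreC_eq (l : List Char) (hnul : ∀ c ∈ l, c ≠ '\x00') :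
    ∀ (bs : List (List Char)), bs ≠ [] →
      coreC l bs =
        appendLastC bs ((splitCh '\x00' (l.flatMap markF)).headD []) ++
          (splitCh '\x00' (l.flatMap markF)).tail := by
  induction l with
  | nil =>
    intro bs hbs
    simp [coreC, splitCh, appendLastC_nil_right bs hbs]
  | cons c rest ih =>
    intro bs hbs
    have hnul' : ∀ x ∈ rest, x ≠ '\x00' := fun x hx => hnul x (List.mem_cons_of_mem _ hx)
    obtain ⟨h', r', hr⟩ : ∃ h' r', splitCh '\x00' (rest.flatMap markF) = h' :: r' := by
      cases hx : splitCh '\x00' (rest.flatMap markF) with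
      | nil => exact absurd hx (splitCh_ne_nil _ _)
      | cons a b => exact ⟨a, b, rfl⟩
    have hcnul : c ≠ '\x00' := hnul c List.mem_cons_self
    by_cases hcl : c = ')'
    · subst hcl
      have := ih hnul' (bs ++ [[')']]) (by simp)
      rw [hr] at this
      simp only [coreC]
      rw [this]
      simp [markF, splitCh, hr, appendLastC_append_singleton, appendLastC_nil_right bs hbs]
    · by_cases hop : c = '('
      · subst hop
        have := ih hnul' (appendLastC bs ['('] ++ [[]]) (by simp)
        rw [hr] at this
        simp only [coreC, if_neg (by decide : ¬ ('(' = ')'))]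
        rw [this]
        simp [markF, splitCh, hr, appendLastC_append_singleton]
      · by_cases hcm : c = ','
        · subst hcm
          have := ih hnul' (bs ++ [[]]) (by simp)
          rw [hr] at this
          simp only [coreC, if_neg (by decide : ¬ (',' = ')')), if_neg (by decide : ¬ (',' = '('))]
          rw [this]
          simp [markF, splitCh, hr, appendLastC_append_singleton, appendLastC_nil_right bs hbs]
        · have := ih hnul' (appendLastC bs [c]) (appendLastC_ne_nil bs [c])
          rw [hr] at this
          simp only [coreC, if_neg hcl, if_neg hop, if_neg hcm]
          rw [this]
          simp [markF, hcl, hop, hcm, splitCh, hr, hcnul, appendLastC_assoc]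

-- the three sequential replaces of B act on each cleaned char as markF
theorem mark_flatMap (l : List Char) :
    ((l.flatMap (fun c => if c = '(' then ['(', '\x00'] else [c])).flatMap
        (fun c => if c = ')' then ['\x00', ')'] else [c])).flatMap
      (fun c => if c = ',' then ['\x00'] else [c]) = l.flatMap markF := by
  rw [List.flatMap_assoc, List.flatMap_assoc]
  apply List.flatMap_congr
  intro c _
  by_cases h1 : c = '(' <;> by_cases h2 : c = ')' <;> by_cases h3 : c = ',' <;>
    simp_all [markF]

theorem flatMap_space_filter (l : List Char) :
    l.flatMap (fun c => if c = ' ' then [] else [c]) = l.filter (· ≠ ' ') := by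
  induction l with
  | nil => rfl
  | cons c t ih => by_cases h : c = ' ' <;> simp [h, List.filter, ih]

-- B unfolded to spec level
theorem alt_eq (s : String) :
    build_tree_block_alt s =
      (splitCh '\x00'
        (((s.toList.takeWhile (· ≠ ';')).filter (· ≠ ' ')).flatMap markF)).map String.ofList := by
  unfold build_tree_block_alt
  obtain ⟨r, hr⟩ := splitCh_head ';' s.toList
  have hsplit1 : PySem.Str.split? s ";" = some ((splitCh ';' s.toList).map String.ofList) := by
    simp [PySem.Str.split?, PySem.Chars.split?, splitOn_single]
  rw [hsplit1]
  rw [hr]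
  simp only [Option.getD_some, List.map_cons, PySem.List.pyGetD_zero_cons]
  have hrep : ∀ (a : String) (d : Char) (new : List Char),
      PySem.Str.replace a (String.singleton d) (String.ofList new) =
        String.ofList (a.toList.flatMap (fun c => if c = d then new else [c])) := by
    intro a d new
    simp [PySem.Str.replace, String.singleton, replace_single]
  have e1 : (" " : String) = String.singleton ' ' := by decide
  have e1' : ("" : String) = String.ofList [] := by decide
  have e2 : ("(" : String) = String.singleton '(' := by decide
  have e2' : ("(\x00" : String) = String.ofList ['(', '\x00'] := by decide
  have e3 : (")" : String) = String.singleton ')' := by decide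
  have e3' : ("\x00)" : String) = String.ofList ['\x00', ')'] := by decide
  have e4 : ("," : String) = String.singleton ',' := by decide
  have e4' : ("\x00" : String) = String.ofList ['\x00'] := by decide
  rw [e1, e1', hrep, e2, e2', hrep, e3, e3', hrep, e4, e4', hrep]
  have hsplit2 : ∀ (cs : List Char),
      PySem.Str.split? (String.ofList cs) "\x00" = some ((splitCh '\x00' cs).map String.ofList) := by
    intro cs
    simp [PySem.Str.split?, PySem.Chars.split?, splitOn_single]
  rw [hsplit2]
  simp only [Option.getD_some, String.toList_ofList]
  rw [flatMap_space_filter, mark_flatMap]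

-- ===== VERDICT (by name: the statement is the Claim_ definition above) =====
theorem build_tree_block_spec : Claim_equal_build_tree_block := by
  intro s hdom
  unfold Spec_build_tree_block
  have hnul : ∀ c ∈ (s.toList.takeWhile (· ≠ ';')).filter (· ≠ ' '), c ≠ '\x00' := by
    intro c hc
    have hc' : c ∈ s.toList := (List.takeWhile_prefix _).subset (List.mem_of_mem_filter hc)
    have := (List.all_eq_true.mp hdom) c hc'
    intro heq; subst heq; simp [pvDomChar] at this
  have hA : build_tree_block s =
      (coreC ((s.toList.takeWhile (· ≠ ';')).filter (· ≠ ' ')) [[]]).map String.ofList := by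
    have := btbLoop_eq_coreC s.toList [[]]
    simpa [build_tree_block] using this
  rw [hA, alt_eq]
  congr 1
  rw [coreC_eq _ hnul [[]] (by simp)]
  obtain ⟨h', r', hr⟩ : ∃ h' r',
      splitCh '\x00' (((s.toList.takeWhile (· ≠ ';')).filter (· ≠ ' ')).flatMap markF) = h' :: r' := by
    cases hx : splitCh '\x00' (((s.toList.takeWhile (· ≠ ';')).filter (· ≠ ' ')).flatMap markF) with
    | nil => exact absurd hx (splitCh_ne_nil _ _)
    | cons a b => exact ⟨a, b, rfl⟩
  rw [hr]
  simp [appendLastC]
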